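-- pv_equiv track=rewrite | github.com/NLarchive/QAgents-workflows | orchestrators/quasar_orchestrator.py | _extract_qasm
-- ===== SOURCE A (Python) =====
-- from typing import Dict, List, Any, Optional
--
-- def _extract_qasm(text: str) -> Optional[str]:
--     """Extract QASM code from LLM response."""
--     if not text:
--         return None
--
--     # Clean up common LLM artifacts
--     if "```" in text:
--         lines = text.split("\n")
--         in_block = False
--         qasm_lines = []
--         for line in lines:
--             if line.strip().startswith("```"):
--                 if in_block:
--                     break
--                 in_block = True
--                 continue
--             if in_block:
--                 qasm_lines.append(line)
--         text = "\n".join(qasm_lines)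
--
--     # Find OPENQASM declaration
--     if "OPENQASM" in text:
--         idx = text.find("OPENQASM")
--         return text[idx:].strip()
--
--     # Try to construct valid QASM
--     if "qreg" in text or "include" in text:
--         return "OPENQASM 2.0;\ninclude \"qelib1.inc\";\n" + text.strip()
--
--     return None
-- ===== SOURCE B (Python) =====
-- def _extract_qasm(text):
--     """Extract QASM code from LLM response.
--
--     Locate-fences-then-slice decomposition: instead of a stateful single-pass
--     accumulation, collect the indices of fence lines and slice between them."""
--     if not text:
--         return None
--
--     if "```" in text:
--         lines = text.split("\n")
--         fences = [i for i, ln in enumerate(lines) if ln.strip().startswith("```")]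
--         start = fences[0] + 1 if fences else len(lines)
--         end = fences[1] if len(fences) >= 2 else len(lines)
--         text = "\n".join(lines[start:end])
--
--     if "OPENQASM" in text:
--         idx = text.find("OPENQASM")
--         return text[idx:].strip()
--
--     if "qreg" in text or "include" in text:
--         return "OPENQASM 2.0;\ninclude \"qelib1.inc\";\n" + text.strip()
--
--     return None
-- ===== Notes on version B (the rewrite author's own statement) =====
-- stated objective: simpler
-- what changed: The stateful single-pass fence loop (in_block flag, accumulator, break) is replaced by a locate-then-slice decomposition: collect the indices of fence lines, then take lines[first+1 : second-or-end] and rejoin.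
import Mathlib
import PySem

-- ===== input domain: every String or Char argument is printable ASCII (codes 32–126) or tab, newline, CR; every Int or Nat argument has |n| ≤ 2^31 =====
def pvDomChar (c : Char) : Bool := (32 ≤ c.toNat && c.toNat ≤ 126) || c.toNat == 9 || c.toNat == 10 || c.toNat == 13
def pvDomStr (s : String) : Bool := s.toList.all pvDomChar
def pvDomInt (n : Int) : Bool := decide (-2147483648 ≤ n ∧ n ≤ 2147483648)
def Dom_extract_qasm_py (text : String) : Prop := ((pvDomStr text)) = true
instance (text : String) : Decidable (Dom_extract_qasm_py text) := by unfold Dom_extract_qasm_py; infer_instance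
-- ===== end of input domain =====

-- B replaces A's stateful fence-collecting loop (flag + accumulator + break) by locate-the-fence-indices-then-slice; objective: simpler.

-- fence-line test both sources use: line.strip().startswith("```")
def isFence (l : String) : Bool := PySem.Str.startswith (PySem.Str.strip l) "```"

-- ===== PORT A =====
-- A's for-loop with in_block flag, accumulator and break
def aLoop : List String → Bool → List String → List String
  | [], _, acc => acc
  | l :: rest, inBlock, acc =>
    if isFence l then
      if inBlock then acc
      else aLoop rest true acc
    else
      if inBlock then aLoop rest inBlock (acc ++ [l])
      else aLoop rest inBlock acc

def extract_qasm_py (text : String) : Option String :=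
  if text = "" then none
  else
    let text :=
      if PySem.Str.isIn "```" text then
        let lines := (PySem.Str.split? text "\n").getD []   -- "\n" ≠ "", so split? is some
        PySem.Str.join "\n" (aLoop lines false [])
      else text
    if PySem.Str.isIn "OPENQASM" text then
      let idx := PySem.Str.find text "OPENQASM"
      some (PySem.Str.strip (PySem.Str.slice text (some idx) none))
    else if PySem.Str.isIn "qreg" text || PySem.Str.isIn "include" text then
      some ("OPENQASM 2.0;\ninclude \"qelib1.inc\";\n" ++ PySem.Str.strip text)
    else none

-- ===== PORT B =====
-- B's code-block part: list of fence-line indices, then one slice between the first and second fence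
def bBlock (lines : List String) : List String :=
  let fences : List Int :=
    ((PySem.List.enumerate lines 0).filter (fun p => isFence p.2)).map Prod.fst
  let start : Int := match fences with | [] => (lines.length : Int) | i :: _ => i + 1
  let stop : Int := match fences with | _ :: j :: _ => j | _ => (lines.length : Int)
  PySem.List.slice lines (some start) (some stop)

def extract_qasm_py_alt (text : String) : Option String :=
  if text = "" then none
  else
    let text :=
      if PySem.Str.isIn "```" text then
        PySem.Str.join "\n" (bBlock ((PySem.Str.split? text "\n").getD []))
      else text
    if PySem.Str.isIn "OPENQASM" text then
      let idx := PySem.Str.find text "OPENQASM"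
      some (PySem.Str.strip (PySem.Str.slice text (some idx) none))
    else if PySem.Str.isIn "qreg" text || PySem.Str.isIn "include" text then
      some ("OPENQASM 2.0;\ninclude \"qelib1.inc\";\n" ++ PySem.Str.strip text)
    else none

-- ===== PRECONDITION & SPEC =====
def Spec_extract_qasm_py (text : String) (out : Option String) : Prop := out = extract_qasm_py_alt text
instance (text : String) (out : Option String) : Decidable (Spec_extract_qasm_py text out) := by unfold Spec_extract_qasm_py; infer_instance

-- ===== CLAIM (what is proved, stated in full; the proofs are below) =====
def Claim_equal_extract_qasm_py : Prop := ∀ (text : String), Dom_extract_qasm_py text → Spec_extract_qasm_py text (extract_qasm_py text)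

-- ===== LEMMAS AND PROOFS =====

-- Nat-valued fence indices (proof-side characterisation of B's fences list)
def idxs : List String → List Nat
  | [] => []
  | l :: r => if isFence l then 0 :: (idxs r).map (· + 1) else (idxs r).map (· + 1)

-- common reading of "the first code block": lines strictly between the first fence and the next one (or the end)
def blockOf (lines : List String) : List String :=
  match idxs lines with
  | [] => []
  | i :: rest =>
    (lines.drop (i + 1)).take ((match rest with | [] => lines.length | j :: _ => j) - (i + 1))

theorem enumFilter_eq_idxs (lines : List String) : ∀ (s : Int),
    (((PySem.List.enumerate lines s).filter (fun p => isFence p.2)).map Prod.fst)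
      = (idxs lines).map (fun (k : Nat) => s + (k : Int)) := by
  induction lines with
  | nil => intro s; simp [idxs, PySem.List.enumerate]
  | cons l r ih =>
    intro s
    rw [PySem.List.enumerate_cons, List.filter_cons]
    by_cases h : isFence l = true
    · simp only [h, if_true, List.map_cons, ih, idxs, List.map_map]
      congr 1
      · norm_num
      · apply List.map_congr_left; intro k _; simp only [Function.comp_apply]; push_cast; ring
    · simp only [h, if_false, ih, idxs, Bool.false_eq_true, List.map_map]
      apply List.map_congr_left; intro k _; simp only [Function.comp_apply]; push_cast; ring

theorem enumFilter_eq_idxs0 (lines : List String) :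
    (((PySem.List.enumerate lines 0).filter (fun p => isFence p.2)).map Prod.fst)
      = (idxs lines).map (fun (k : Nat) => (k : Int)) := by
  rw [enumFilter_eq_idxs]; simp

theorem bBlock_eq (lines : List String) : bBlock lines = blockOf lines := by
  unfold bBlock blockOf
  rw [enumFilter_eq_idxs0]
  cases hx : idxs lines with
  | nil =>
    simp only [List.map_nil]
    rw [PySem.List.slice_natCast]
    simp
  | cons i rest =>
    cases rest with
    | nil =>
      simp only [List.map_cons, List.map_nil]
      have h1 : ((i : Nat) : Int) + 1 = ((i + 1 : Nat) : Int) := by push_cast; ring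
      rw [h1, PySem.List.slice_natCast]
    | cons j rest' =>
      simp only [List.map_cons]
      have h1 : ((i : Nat) : Int) + 1 = ((i + 1 : Nat) : Int) := by push_cast; ring
      rw [h1, PySem.List.slice_natCast]

-- A's loop once inside a block collects lines up to the first fence index of the remainder
theorem aLoop_true (r : List String) : ∀ (acc : List String),
    aLoop r true acc = acc ++ r.take (match idxs r with | [] => r.length | k :: _ => k) := by
  induction r with
  | nil => intro acc; simp [aLoop]
  | cons x r' ih =>
    intro acc
    by_cases h : isFence x = true
    · simp [aLoop, h, idxs]
    · simp only [aLoop, h, Bool.false_eq_true, if_false, if_true, ih, idxs]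
      cases hj : idxs r' <;> simp [List.take_succ_cons, List.append_assoc]

theorem aLoop_eq (lines : List String) : aLoop lines false [] = blockOf lines := by
  induction lines with
  | nil => simp [aLoop, blockOf, idxs]
  | cons l rest ih =>
    by_cases h : isFence l = true
    · rw [aLoop]
      simp only [h, if_true, Bool.false_eq_true, if_false, aLoop_true, List.nil_append]
      unfold blockOf
      simp only [idxs, h, if_true]
      cases hj : idxs rest with
      | nil => simp
      | cons k more => simp
    · rw [aLoop]
      simp only [h, Bool.false_eq_true, if_false, ih]
      unfold blockOf
      simp only [idxs, h, Bool.false_eq_true, if_false]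
      cases hj : idxs rest with
      | nil => simp
      | cons k more =>
        cases more with
        | nil =>
          simp only [List.map_cons, List.map_nil, List.drop_succ_cons, List.length_cons]
          congr 1
          omega
        | cons m more' =>
          simp only [List.map_cons, List.drop_succ_cons]
          congr 1
          omega

-- ===== VERDICT (by name: the statement is the Claim_ definition above) =====
theorem extract_qasm_py_spec : Claim_equal_extract_qasm_py := by
  intro text _
  unfold Spec_extract_qasm_py extract_qasm_py extract_qasm_py_alt
  simp only [bBlock_eq, aLoop_eq]
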